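-- pv_equiv track=rewrite | github.com/areumsim/code_test | testdome/FileOwners.py | group_by_owners
-- ===== SOURCE A (Python) =====
-- def group_by_owners(files):
--     newDict = {}
--     for v, k in files.items():
--         if k in newDict:
--             tmp = newDict.get(k)
--             tmp.append(v)
--             newDict[k] = tmp
--         else:
--             newDict[k] = [v]
--     return newDict
-- ===== SOURCE B (Python) =====
-- def group_by_owners(files):
--     owners = list(dict.fromkeys(files.values()))
--     return {owner: [f for f, o in files.items() if o == owner] for owner in owners}
-- ===== Notes on version B (the rewrite author's own statement) =====
-- stated objective: idiomatic
-- what changed: Replaces the single accumulating dict pass (with in-check and append) by first deduplicating the owners and then building each group with one filtering comprehension per owner.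
import Mathlib
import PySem

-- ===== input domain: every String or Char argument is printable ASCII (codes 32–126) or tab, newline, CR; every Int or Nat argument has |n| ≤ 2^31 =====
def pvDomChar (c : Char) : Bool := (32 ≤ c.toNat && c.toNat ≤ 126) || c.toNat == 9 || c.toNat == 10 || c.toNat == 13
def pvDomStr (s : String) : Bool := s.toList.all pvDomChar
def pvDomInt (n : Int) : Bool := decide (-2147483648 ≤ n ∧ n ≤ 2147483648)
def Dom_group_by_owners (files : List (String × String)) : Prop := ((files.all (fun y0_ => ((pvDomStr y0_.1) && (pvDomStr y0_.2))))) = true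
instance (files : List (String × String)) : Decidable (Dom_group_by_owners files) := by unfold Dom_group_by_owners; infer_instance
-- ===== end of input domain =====

-- B replaces A's single accumulating dict pass by an owners-dedup followed by one
-- filtering comprehension per owner (idiomatic decomposition; not claimed faster).


-- ===== PORT A =====
-- literal port of A: one fold over files.items() accumulating a dict;
-- 'tmp = newDict.get(k)' is ported as getD _ [] — it is reached only when k is a key.
def group_by_owners (files : List (String × String)) : List (String × List String) :=
  (files.foldl (fun newDict p =>
      if newDict.contains p.2 then
        let tmp := newDict.getD p.2 []
        newDict.insert p.2 (tmp ++ [p.1])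
      else
        newDict.insert p.2 [p.1]) PySem.Dict.empty).items

-- ===== PORT B =====
-- literal port of B: owners = list(dict.fromkeys(files.values())); then the dict
-- comprehension over the (distinct) owners, each group one filtering pass.
def group_by_owners_alt (files : List (String × String)) : List (String × List String) :=
  let owners := PySem.List.dedup (files.map (fun p => p.2))
  owners.map (fun owner => (owner, (files.filter (fun p => p.2 == owner)).map (fun p => p.1)))

-- ===== PRECONDITION & SPEC =====
def Spec_group_by_owners (files : List (String × String)) (out : List (String × List String)) : Prop := out = group_by_owners_alt files
instance (files : List (String × String)) (out : List (String × List String)) : Decidable (Spec_group_by_owners files out) := by unfold Spec_group_by_owners; infer_instance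

-- ===== CLAIM (what is proved, stated in full; the proofs are below) =====
def Claim_equal_group_by_owners : Prop := ∀ (files : List (String × String)), Dom_group_by_owners files → Spec_group_by_owners files (group_by_owners files)

-- ===== LEMMAS AND PROOFS =====

-- A's loop body, with the contains-test resolved, is a plain append-insert.
lemma gbo_step_eq :
    (fun (d : PySem.Dict String (List String)) (p : String × String) =>
      if d.contains p.2 then
        let tmp := d.getD p.2 []
        d.insert p.2 (tmp ++ [p.1])
      else
        d.insert p.2 [p.1])
    = fun d p => d.insert p.2 (d.getD p.2 [] ++ [p.1]) := by
  funext d p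
  by_cases h : d.contains p.2 = true
  · simp [h]
  · have h' : d.contains p.2 = false := by simpa using h
    simp [h', PySem.Dict.getD_of_not_contains d [] h']

-- A's fold, rewritten over the swapped (owner, file) list in modify form.
lemma gbo_fold_eq (files : List (String × String)) :
    group_by_owners files
      = ((files.map (fun p => (p.2, p.1))).foldl
          (fun d p => d.modify p.1 [] (fun x => x ++ [p.2])) PySem.Dict.empty).items := by
  unfold group_by_owners
  rw [gbo_step_eq, List.foldl_map]
  rfl

theorem group_by_owners_eq_alt (files : List (String × String)) :
    group_by_owners files = group_by_owners_alt files := by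
  rw [gbo_fold_eq]
  have hnd : ((files.map (fun p => (p.2, p.1))).foldl
      (fun d p => d.modify p.1 [] (fun x => x ++ [p.2])) PySem.Dict.empty).keys.Nodup := by
    exact PySem.Dict.nodup_keys_foldl_modify_key (files.map (fun p => (p.2, p.1)))
      (fun p => p.1) [] (fun _ p x => x ++ [p.2]) PySem.Dict.empty (by simp)
  rw [PySem.Dict.items_eq_map_keys _ hnd []]
  have hkeys : ((files.map (fun p => (p.2, p.1))).foldl
      (fun d p => d.modify p.1 [] (fun x => x ++ [p.2])) PySem.Dict.empty).keys
      = PySem.List.dedup (files.map (fun p => p.2)) := by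
    rw [PySem.Dict.keys_foldl_modify_key (files.map (fun p => (p.2, p.1)))
      (fun p => p.1) [] (fun _ p x => x ++ [p.2]) PySem.Dict.empty]
    simp [pysem, List.map_map, Function.comp_def]
    rw [PySem.Set.ofList, List.foldl_map]
    rfl
  rw [hkeys]
  unfold group_by_owners_alt
  apply List.map_congr_left
  intro o _
  rw [PySem.Dict.getD_foldl_modify_append]
  simp [List.filter_map, List.map_map, Function.comp_def]

-- ===== VERDICT (by name: the statement is the Claim_ definition above) =====
theorem group_by_owners_spec : Claim_equal_group_by_owners := by
  intro files _
  unfold Spec_group_by_owners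
  exact group_by_owners_eq_alt files
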